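-- pv_equiv track=rewrite | github.com/williu421/cow-party | hullGame.py | getTriples
-- ===== SOURCE A (Python) =====
-- def getTriples(l):
--     outSet = set()
--     for a in l:
--         for b in l:
--             for c in l:
--                 if not ((a,b,c) in outSet or (a,c,b) in outSet or (b,a,c) in\
--                 outSet or (b,c,a) in outSet or (c,a,b) in outSet or (c,b,a) in outSet):
--                     if a!= b and b!= c and a!=c:
--                         outSet.add((a,b,c))
--     return outSet
-- ===== SOURCE B (Python) =====
-- def getTriples(l):
--     seen = list(dict.fromkeys(l))
--
--     def combos2(xs):
--         if not xs:
--             return []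
--         y, rest = xs[0], xs[1:]
--         return [(y, z) for z in rest] + combos2(rest)
--
--     def combos3(xs):
--         if not xs:
--             return []
--         x, rest = xs[0], xs[1:]
--         return [(x, y, z) for (y, z) in combos2(rest)] + combos3(rest)
--
--     return set(combos3(seen))
-- ===== Notes on version B (the rewrite author's own statement) =====
-- stated objective: alternative
-- what changed: B first deduplicates the list to its distinct values in first-occurrence order and then emits each 3-combination of those values exactly once, instead of A's triple nested loop over the whole list with six permutation-membership tests against the growing set.
import Mathlib
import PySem

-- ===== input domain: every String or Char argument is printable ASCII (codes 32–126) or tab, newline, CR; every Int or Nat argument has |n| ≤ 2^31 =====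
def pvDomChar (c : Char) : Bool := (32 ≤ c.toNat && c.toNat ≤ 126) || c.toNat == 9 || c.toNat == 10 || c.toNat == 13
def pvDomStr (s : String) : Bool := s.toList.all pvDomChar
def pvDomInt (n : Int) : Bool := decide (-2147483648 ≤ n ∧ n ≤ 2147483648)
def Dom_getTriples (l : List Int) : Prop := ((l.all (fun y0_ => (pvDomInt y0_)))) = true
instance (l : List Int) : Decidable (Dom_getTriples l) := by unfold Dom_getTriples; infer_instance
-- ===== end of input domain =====

-- B deduplicates once and emits each 3-combination of the distinct values directly,
-- instead of A's triple nested loop with six permutation-membership tests (alternative algorithm).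

-- ===== PORT A =====
-- One body of A's innermost loop: the six-way permutation membership test, then the
-- distinctness test, then set.add.
def pyStep (s : List (Int × Int × Int)) (a b c : Int) : List (Int × Int × Int) :=
  if ¬((a,b,c) ∈ s ∨ (a,c,b) ∈ s ∨ (b,a,c) ∈ s ∨ (b,c,a) ∈ s ∨ (c,a,b) ∈ s ∨ (c,b,a) ∈ s) then
    if a ≠ b ∧ b ≠ c ∧ a ≠ c then PySem.Set.add s (a,b,c) else s
  else s

def loopC (lc : List Int) (a b : Int) (s : List (Int × Int × Int)) : List (Int × Int × Int) :=
  lc.foldl (fun s c => pyStep s a b c) s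

def loopB (lb lc : List Int) (a : Int) (s : List (Int × Int × Int)) : List (Int × Int × Int) :=
  lb.foldl (fun s b => loopC lc a b s) s

def getTriples (l : List Int) : List (Int × Int × Int) :=
  l.foldl (fun s a => loopB l l a s) PySem.Set.empty

-- ===== PORT B =====
def combos2 : List Int → List (Int × Int)
  | [] => []
  | y :: rest => rest.map (fun z => (y, z)) ++ combos2 rest

def combos3 : List Int → List (Int × Int × Int)
  | [] => []
  | x :: rest => (combos2 rest).map (fun p => (x, p.1, p.2)) ++ combos3 rest

def getTriples_alt (l : List Int) : List (Int × Int × Int) :=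
  PySem.Set.ofList (combos3 (PySem.List.dedup l))

-- ===== PRECONDITION & SPEC =====
def Spec_getTriples (l : List Int) (out : List (Int × Int × Int)) : Prop := out = getTriples_alt l
instance (l : List Int) (out : List (Int × Int × Int)) : Decidable (Spec_getTriples l out) := by unfold Spec_getTriples; infer_instance

-- ===== CLAIM (what is proved, stated in full; the proofs are below) =====
def Claim_equal_getTriples : Prop := ∀ (l : List Int), Dom_getTriples l → Spec_getTriples l (getTriples l)

-- ===== LEMMAS AND PROOFS =====

-- first-occurrence dedup, in a filter form convenient for the invariants
def myD : List Int → List Int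
  | [] => []
  | x :: xs => x :: (myD xs).filter (fun y => decide (y ≠ x))

theorem discard_eq_filter (s : List Int) (x : Int) :
    PySem.Set.discard s x = s.filter (fun y => decide (y ≠ x)) := by
  simp only [PySem.Set.discard]
  apply List.filter_congr
  intro y _
  by_cases h : y = x <;> simp [h]

theorem dedup_eq_myD (l : List Int) : PySem.List.dedup l = myD l := by
  induction l with
  | nil => rfl
  | cons x xs ih =>
    have h1 : PySem.List.dedup (x :: xs) = x :: PySem.Set.discard (PySem.List.dedup xs) x := by
      simp [PySem.Set.ofList_cons]
    rw [h1, discard_eq_filter, ih]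
    rfl

theorem mem_myD (x : Int) (l : List Int) : x ∈ myD l ↔ x ∈ l := by
  rw [← dedup_eq_myD]; exact PySem.List.mem_dedup l x

theorem nodup_myD (l : List Int) : (myD l).Nodup := by
  rw [← dedup_eq_myD]; exact PySem.List.nodup_dedup l

theorem myD_filter (p : Int → Bool) (l : List Int) :
    (myD l).filter p = myD (l.filter p) := by
  induction l with
  | nil => rfl
  | cons x xs ih =>
    by_cases hx : p x
    · have : (x :: xs).filter p = x :: xs.filter p := by simp [hx]
      rw [this]
      show (x :: (myD xs).filter (fun y => decide (y ≠ x))).filter p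
          = x :: (myD (xs.filter p)).filter (fun y => decide (y ≠ x))
      rw [← ih, List.filter_cons_of_pos hx, List.filter_filter, List.filter_filter]
      congr 1
      apply List.filter_congr
      intro y _
      by_cases h : y = x <;> simp [h, hx]
    · have : (x :: xs).filter p = xs.filter p := by simp [hx]
      rw [this, ← ih]
      show (x :: (myD xs).filter (fun y => decide (y ≠ x))).filter p = (myD xs).filter p
      rw [List.filter_cons_of_neg (by simpa using hx), List.filter_filter]
      apply List.filter_congr
      intro y _
      by_cases h : y = x <;> simp [h, hx]

-- the six-way membership test of A, as a predicate
abbrev memT (s : List (Int × Int × Int)) (a b c : Int) : Prop :=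
  (a,b,c) ∈ s ∨ (a,c,b) ∈ s ∨ (b,a,c) ∈ s ∨ (b,c,a) ∈ s ∨ (c,a,b) ∈ s ∨ (c,b,a) ∈ s

theorem memT_append (s t : List (Int × Int × Int)) (a b c : Int) :
    memT (s ++ t) a b c ↔ memT s a b c ∨ memT t a b c := by
  simp [memT]; tauto

-- "T lists some values of L in L's first-occurrence order"
def OrdL (L T : List Int) : Prop := T = (myD L).filter (fun x => decide (x ∈ T))

theorem OrdL_nodup {L T : List Int} (h : OrdL L T) : T.Nodup := by
  rw [h]; exact (nodup_myD L).filter _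

theorem OrdL_nil (L : List Int) : OrdL L ([] : List Int) := by
  simp [OrdL]

theorem OrdL_suffix {L d t : List Int} (h : OrdL L (d ++ t)) : OrdL L t := by
  have hnd : (d ++ t).Nodup := OrdL_nodup h
  have ht : t = (d ++ t).filter (fun x => decide (x ∈ t)) := by
    rw [List.filter_append]
    have h1 : d.filter (fun x => decide (x ∈ t)) = [] := by
      rw [List.filter_eq_nil_iff]
      intro x hx
      simp only [decide_eq_true_eq]
      exact fun hxt => (List.disjoint_of_nodup_append hnd) hx hxt
    have h2 : t.filter (fun x => decide (x ∈ t)) = t :=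
      List.filter_eq_self.2 (fun x hx => by simpa using hx)
    rw [h1, h2, List.nil_append]
  unfold OrdL at h ⊢
  calc t = (d ++ t).filter (fun x => decide (x ∈ t)) := ht
    _ = (((myD L).filter (fun x => decide (x ∈ d ++ t))).filter (fun x => decide (x ∈ t))) := by
        rw [← h]
    _ = (myD L).filter (fun x => decide (x ∈ t)) := by
        rw [List.filter_filter]
        apply List.filter_congr
        intro y _
        by_cases hy : y ∈ t <;> simp [hy]

theorem OrdL_cons_not_mem {x : Int} {m T : List Int} (h : OrdL (x :: m) T) (hx : x ∉ T) :
    OrdL m T := by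
  unfold OrdL at h ⊢
  calc T = (myD (x :: m)).filter (fun y => decide (y ∈ T)) := h
    _ = ((myD m).filter (fun y => decide (y ≠ x))).filter (fun y => decide (y ∈ T)) := by
        show (x :: (myD m).filter (fun y => decide (y ≠ x))).filter (fun y => decide (y ∈ T)) = _
        rw [List.filter_cons_of_neg (by simpa using hx)]
    _ = (myD m).filter (fun y => decide (y ∈ T)) := by
        rw [List.filter_filter]
        apply List.filter_congr
        intro y _
        by_cases hy : y ∈ T
        · have : y ≠ x := fun he => hx (he ▸ hy)
          simp [hy, this]
        · simp [hy]

theorem OrdL_cons_mem {x : Int} {m T : List Int} (h : OrdL (x :: m) T) (hx : x ∈ T) :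
    ∃ T', T = x :: T' ∧ OrdL m T' := by
  have hnd : T.Nodup := OrdL_nodup h
  refine ⟨(myD m).filter (fun y => decide (y ∈ T) && decide (y ≠ x)), ?_, ?_⟩
  · unfold OrdL at h
    calc T = (myD (x :: m)).filter (fun y => decide (y ∈ T)) := h
      _ = x :: ((myD m).filter (fun y => decide (y ≠ x))).filter (fun y => decide (y ∈ T)) := by
          show (x :: (myD m).filter (fun y => decide (y ≠ x))).filter (fun y => decide (y ∈ T)) = _
          rw [List.filter_cons_of_pos (by simpa using hx)]
      _ = _ := by rw [List.filter_filter]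
  · unfold OrdL
    apply Eq.symm
    apply List.filter_congr
    intro y hy
    have hym : y ∈ m := by
      have := (mem_myD y m).1 hy
      exact this
    by_cases h1 : y ≠ x ∧ y ∈ T
    · simp only [List.mem_filter, hy, true_and]
      simp [h1.1, h1.2]
      
    · rw [not_and] at h1
      by_cases h2 : y = x
      · simp only [List.mem_filter, hy, true_and]
        simp [h2]
      · have h3 : y ∉ T := h1 (by exact h2)
        simp only [List.mem_filter, hy, true_and]
        simp [h2, h3]

-- pyStep case lemmas
theorem pyStep_of_memT {s : List (Int × Int × Int)} {a b c : Int} (h : memT s a b c) :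
    pyStep s a b c = s := by
  unfold pyStep
  rw [if_neg (not_not_intro (by simpa [memT] using h))]

theorem pyStep_not_distinct {s : List (Int × Int × Int)} {a b c : Int}
    (h : ¬(a ≠ b ∧ b ≠ c ∧ a ≠ c)) : pyStep s a b c = s := by
  unfold pyStep; split_ifs <;> tauto

theorem pyStep_add {s : List (Int × Int × Int)} {a b c : Int}
    (h1 : ¬ memT s a b c) (h2 : a ≠ b ∧ b ≠ c ∧ a ≠ c) :
    pyStep s a b c = s ++ [(a,b,c)] := by
  unfold pyStep
  rw [if_pos (by simpa [memT] using h1), if_pos h2]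
  exact PySem.Set.add_of_not_mem (fun hm => h1 (Or.inl hm))

-- the candidate filter of the innermost loop
def Pc (s : List (Int × Int × Int)) (a b : Int) : Int → Bool :=
  fun z => decide (z ≠ a) && decide (z ≠ b) && !(decide (memT s a b z))

theorem memT_single {a b c z : Int} (hab : a ≠ b) (hza : z ≠ a) (hzb : z ≠ b) :
    memT [(a,b,c)] a b z ↔ z = c := by
  simp [memT, Prod.ext_iff]; tauto

-- innermost loop, degenerate round a = b: no element passes the distinctness test
theorem loopC_eq {a b : Int} (hab : a = b) :
    ∀ (m : List Int) (s : List (Int × Int × Int)), loopC m a b s = s := by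
  intro m
  induction m with
  | nil => intro s; rfl
  | cons c m ih =>
    intro s
    have : pyStep s a b c = s := pyStep_not_distinct (by tauto)
    simp [loopC, List.foldl_cons] at ih ⊢
    rw [this]; exact ih s

theorem fst_mem_combos2 {T : List Int} {p : Int × Int} (h : p ∈ combos2 T) : p.1 ∈ T := by
  induction T with
  | nil => simp [combos2] at h
  | cons y ys ih =>
    simp only [combos2, List.mem_append, List.mem_map] at h
    rcases h with ⟨z, _, rfl⟩ | h
    · simp
    · exact List.mem_cons_of_mem _ (ih h)

theorem mem_combos2 {T : List Int} {y z : Int} (h : (y, z) ∈ combos2 T) : y ∈ T ∧ z ∈ T := by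
  induction T with
  | nil => simp [combos2] at h
  | cons w ws ih =>
    simp only [combos2, List.mem_append, List.mem_map] at h
    rcases h with ⟨u, hu, he⟩ | h
    · cases he
      exact ⟨List.mem_cons_self, List.mem_cons_of_mem _ hu⟩
    · obtain ⟨h1, h2⟩ := ih h
      exact ⟨List.mem_cons_of_mem _ h1, List.mem_cons_of_mem _ h2⟩

theorem combos2_orient {T : List Int} (hT : T.Nodup) {y z : Int}
    (hy : y ∈ T) (hz : z ∈ T) (hne : y ≠ z) :
    (y, z) ∈ combos2 T ∨ (z, y) ∈ combos2 T := by
  induction T with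
  | nil => simp at hy
  | cons w ws ih =>
    rcases List.mem_cons.1 hy with rfl | hy'
    · have hz' : z ∈ ws := Or.resolve_left (List.mem_cons.1 hz) (fun he => hne he.symm)
      refine Or.inl ?_
      simp only [combos2, List.mem_append, List.mem_map]
      exact Or.inl ⟨z, hz', rfl⟩
    · rcases List.mem_cons.1 hz with rfl | hz'
      · refine Or.inr ?_
        simp only [combos2, List.mem_append, List.mem_map]
        exact Or.inl ⟨y, hy', rfl⟩
      · rcases ih (List.Nodup.of_cons hT) hy' hz' with h | h
        · exact Or.inl (by simp only [combos2, List.mem_append]; exact Or.inr h)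
        · exact Or.inr (by simp only [combos2, List.mem_append]; exact Or.inr h)

theorem nodup_combos2 {T : List Int} (hT : T.Nodup) : (combos2 T).Nodup := by
  induction T with
  | nil => simp [combos2]
  | cons y ys ih =>
    have hys : ys.Nodup := List.Nodup.of_cons hT
    have hyn : y ∉ ys := (List.nodup_cons.1 hT).1
    refine List.Nodup.append ?_ (ih hys) ?_
    · exact List.Nodup.map (fun a b hab => congrArg Prod.snd hab) hys
    · intro p hp hp2
      rcases List.mem_map.1 hp with ⟨z, _, rfl⟩
      exact hyn (fst_mem_combos2 hp2)

theorem fst_mem_combos3 {T : List Int} {p : Int × Int × Int} (h : p ∈ combos3 T) : p.1 ∈ T := by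
  induction T with
  | nil => simp [combos3] at h
  | cons x xs ih =>
    simp only [combos3, List.mem_append, List.mem_map] at h
    rcases h with ⟨q, _, rfl⟩ | h
    · simp
    · exact List.mem_cons_of_mem _ (ih h)

theorem nodup_combos3 {T : List Int} (hT : T.Nodup) : (combos3 T).Nodup := by
  induction T with
  | nil => simp [combos3]
  | cons x xs ih =>
    have hxs : xs.Nodup := List.Nodup.of_cons hT
    have hxn : x ∉ xs := (List.nodup_cons.1 hT).1
    refine List.Nodup.append ?_ (ih hxs) ?_
    · refine List.Nodup.map ?_ (nodup_combos2 hxs)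
      intro p q hpq
      have h2 := congrArg (fun t => t.2.1) hpq
      have h3 := congrArg (fun t => t.2.2) hpq
      exact Prod.ext h2 h3
    · intro p hp hp2
      rcases List.mem_map.1 hp with ⟨q, _, rfl⟩
      exact hxn (fst_mem_combos3 hp2)


-- Pc after appending one fresh triple: same candidates minus the value just taken
theorem Pc_append_single {s : List (Int × Int × Int)} {a b c : Int}
    (hab : a ≠ b) (_hca : c ≠ a) (_hcb : c ≠ b) (z : Int) :
    Pc (s ++ [(a,b,c)]) a b z = (decide (z ≠ c) && Pc s a b z) := by
  by_cases hza : z = a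
  · simp [Pc, hza]
  · by_cases hzb : z = b
    · simp [Pc, hzb]
    · have hm := memT_single (c := c) hab hza hzb
      by_cases hz : memT s a b z
      · have : memT (s ++ [(a,b,c)]) a b z := (memT_append ..).2 (Or.inl hz)
        simp [Pc, hza, hzb, hz, this]
      · by_cases hzc : z = c
        · have hmm : memT (s ++ [(a,b,c)]) a b z := (memT_append ..).2 (Or.inr (hm.2 hzc))
          cases hzc
          simp [Pc, hza, hzb, hmm]
        · have : ¬ memT (s ++ [(a,b,c)]) a b z := by
            intro h
            rcases (memT_append ..).1 h with h | h
            · exact hz h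
            · exact hzc (hm.1 h)
          simp [Pc, hza, hzb, hz, this, hzc]

-- innermost loop: appends (a,b,z) for the fresh candidates z, in first-occurrence order
theorem loopC_spec {a b : Int} (hab : a ≠ b) :
    ∀ (m : List Int) (s : List (Int × Int × Int)),
      loopC m a b s = s ++ (myD (m.filter (Pc s a b))).map (fun z => (a,b,z)) := by
  intro m
  induction m with
  | nil => intro s; simp [loopC, myD]
  | cons c m ih =>
    intro s
    have hstep : loopC (c :: m) a b s = loopC m a b (pyStep s a b c) := by
      simp [loopC]
    by_cases hm : memT s a b c
    · have hPc : Pc s a b c = false := by simp [Pc, hm]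
      rw [hstep, pyStep_of_memT hm, ih, List.filter_cons_of_neg (by simp [hPc])]
    · by_cases hca : c = a
      · have hPc : Pc s a b c = false := by simp [Pc, hca]
        rw [hstep, pyStep_not_distinct (by tauto), ih,
          List.filter_cons_of_neg (by simp [hPc])]
      · by_cases hcb : c = b
        · have hPc : Pc s a b c = false := by simp [Pc, hcb]
          rw [hstep, pyStep_not_distinct (by tauto), ih,
            List.filter_cons_of_neg (by simp [hPc])]
        · have hPc : Pc s a b c = true := by simp [Pc, hca, hcb, hm]
          rw [hstep, pyStep_add hm ⟨hab, fun h => hcb h.symm, fun h => hca h.symm⟩, ih,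
            List.filter_cons_of_pos hPc]
          show _ = s ++ ((c :: (myD (m.filter (Pc s a b))).filter
              (fun y => decide (y ≠ c))).map (fun z => (a,b,z)))
          rw [myD_filter]
          have hfil : (m.filter (Pc s a b)).filter (fun y => decide (y ≠ c))
              = m.filter (Pc (s ++ [(a,b,c)]) a b) := by
            rw [List.filter_filter]
            apply List.filter_congr
            intro z _
            rw [Pc_append_single hab hca hcb]
          rw [hfil]
          simp

-- membership of a permutation in one round's additions (middle loop)
theorem memT_mapbz {T' : List Int} {a b b' z : Int} (hba : b' ≠ a) (hza : z ≠ a) :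
    memT (T'.map (fun w => (a,b,w))) a b' z ↔ (b' = b ∧ z ∈ T') ∨ (z = b ∧ b' ∈ T') := by
  simp only [memT, List.mem_map, Prod.mk.injEq]
  constructor
  · rintro (⟨w,hw,-,e2,e3⟩|⟨w,hw,-,e2,e3⟩|⟨w,hw,e1,-,-⟩|⟨w,hw,e1,-,-⟩|⟨w,hw,e1,-,-⟩|⟨w,hw,e1,-,-⟩)
    · exact Or.inl ⟨e2.symm, e3 ▸ hw⟩
    · exact Or.inr ⟨e2.symm, e3 ▸ hw⟩
    · exact absurd e1.symm hba
    · exact absurd e1.symm hba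
    · exact absurd e1.symm hza
    · exact absurd e1.symm hza
  · rintro (⟨rfl, hz⟩ | ⟨rfl, hb⟩)
    · exact Or.inl ⟨z, hz, by simp⟩
    · exact Or.inr (Or.inl ⟨b', hb, by simp⟩)

-- middle loop: one full round for a fresh outer value a
theorem loopB_spec (lc : List Int) (a : Int) :
    ∀ (lb : List Int) (s : List (Int × Int × Int)) (T : List Int),
      (∀ x ∈ lb, x ∈ lc) → OrdL lc T → OrdL lb T → a ∉ T →
      (∀ b z : Int, b ∈ lc → z ∈ lc → b ≠ a → z ≠ a → b ≠ z →
        (memT s a b z ↔ ¬(b ∈ T ∧ z ∈ T))) →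
      loopB lb lc a s = s ++ (combos2 T).map (fun p => (a, p.1, p.2)) := by
  intro lb
  induction lb with
  | nil =>
    intro s T _ _ hOm _ _
    have hT : T = [] := by simpa [OrdL, myD] using hOm
    subst hT; simp [loopB, combos2]
  | cons b lb ih =>
    intro s T hsub hOl hOm ha H
    have hsub' : ∀ x ∈ lb, x ∈ lc := fun x hx => hsub x (List.mem_cons_of_mem _ hx)
    have hblc : b ∈ lc := hsub b List.mem_cons_self
    have hstep : loopB (b :: lb) lc a s = loopB lb lc a (loopC lc a b s) := by simp [loopB]
    by_cases hbT : b ∈ T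
    · have hba : b ≠ a := fun he => ha (he ▸ hbT)
      have hab : a ≠ b := fun he => hba he.symm
      obtain ⟨T', hTeq, hOm'⟩ := OrdL_cons_mem hOm hbT
      have hOlT' : OrdL lc T' := OrdL_suffix (L := lc) (d := [b]) (t := T')
        (by rw [hTeq] at hOl; exact hOl)
      have hndT : T.Nodup := OrdL_nodup hOl
      have hbT' : b ∉ T' := by
        rw [hTeq] at hndT; exact (List.nodup_cons.1 hndT).1
      have haT' : a ∉ T' := fun h => ha (hTeq ▸ List.mem_cons_of_mem _ h)
      have hmemT : ∀ x : Int, x ∈ T ↔ x = b ∨ x ∈ T' := by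
        intro x; rw [hTeq]; exact List.mem_cons
      have hC : loopC lc a b s = s ++ T'.map (fun z => (a,b,z)) := by
        rw [loopC_spec hab]
        have hD : myD (lc.filter (Pc s a b)) = T' := by
          rw [← myD_filter]
          have hT'eq : T' = (myD lc).filter (fun x => decide (x ∈ T')) := hOlT'
          rw [hT'eq]
          apply List.filter_congr
          intro z hz
          have hzlc : z ∈ lc := (mem_myD z lc).1 hz
          by_cases hza : z = a
          · subst hza; simp [Pc, haT']
          · by_cases hzb : z = b
            · subst hzb; simp [Pc, hbT']
            · have hmem := H b z hblc hzlc hba hza (fun he => hzb he.symm)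
              by_cases hzT' : z ∈ T'
              · have hnm : ¬ memT s a b z := by
                  rw [hmem]; intro hcon
                  exact hcon ⟨hbT, (hmemT z).2 (Or.inr hzT')⟩
                simp [Pc, hza, hzb, hnm, hzT']
              · have hzT : z ∉ T := by
                  intro hzT
                  rcases (hmemT z).1 hzT with he | h
                  · exact hzb he
                  · exact hzT' h
                have hmm : memT s a b z := hmem.2 (fun hcon => hzT hcon.2)
                simp [Pc, hza, hzb, hmm, hzT']
        rw [hD]
      have H' : ∀ b' z : Int, b' ∈ lc → z ∈ lc → b' ≠ a → z ≠ a → b' ≠ z →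
          (memT (s ++ T'.map (fun w => (a,b,w))) a b' z ↔ ¬(b' ∈ T' ∧ z ∈ T')) := by
        intro b' z hb' hz' hba' hza' hbz'
        rw [memT_append, H b' z hb' hz' hba' hza' hbz', memT_mapbz hba' hza']
        constructor
        · rintro (hnot | ⟨rfl, hz⟩ | ⟨rfl, hb⟩)
          · rintro ⟨h1, h2⟩
            exact hnot ⟨(hmemT b').2 (Or.inr h1), (hmemT z).2 (Or.inr h2)⟩
          · rintro ⟨h1, _⟩; exact hbT' h1
          · rintro ⟨_, h2⟩; exact hbT' h2
        · intro hnot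
          by_cases hb'T : b' ∈ T
          · by_cases hzT : z ∈ T
            · rcases (hmemT b').1 hb'T with rfl | hb'T'
              · rcases (hmemT z).1 hzT with rfl | hzT'
                · exact absurd rfl hbz'
                · exact Or.inr (Or.inl ⟨rfl, hzT'⟩)
              · rcases (hmemT z).1 hzT with rfl | hzT'
                · exact Or.inr (Or.inr ⟨rfl, hb'T'⟩)
                · exact absurd ⟨hb'T', hzT'⟩ hnot
            · exact Or.inl (fun hcon => hzT hcon.2)
          · exact Or.inl (fun hcon => hb'T hcon.1)
      rw [hstep, hC, ih _ T' hsub' hOlT' hOm' haT' H', hTeq]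
      simp [combos2, Function.comp_def]
    · have hloopC : loopC lc a b s = s := by
        by_cases hba : b = a
        · exact loopC_eq hba.symm lc s
        · rw [loopC_spec (fun he => hba he.symm)]
          have hnil : lc.filter (Pc s a b) = [] := by
            rw [List.filter_eq_nil_iff]
            intro z hz
            by_cases hza : z = a
            · simp [Pc, hza]
            · by_cases hzb : z = b
              · simp [Pc, hzb]
              · have hmem := H b z hblc hz (fun he => hba he) hza (fun he => hzb he.symm)
                have hmm : memT s a b z := hmem.2 (fun hcon => hbT hcon.1)
                simp [Pc, hza, hzb, hmm]
          rw [hnil]; simp [myD]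
      rw [hstep, hloopC]
      exact ih s T hsub' hOl (OrdL_cons_not_mem hOm hbT) ha H

-- membership of a permutation in one outer round's additions
theorem memT_mapc2 {T' : List Int} (hT' : T'.Nodup) {a a' b c : Int}
    (h1 : a' ≠ b) (h2 : b ≠ c) (h3 : a' ≠ c) :
    memT ((combos2 T').map (fun p => (a, p.1, p.2))) a' b c ↔
      (a' = a ∧ b ∈ T' ∧ c ∈ T') ∨ (b = a ∧ a' ∈ T' ∧ c ∈ T') ∨
      (c = a ∧ a' ∈ T' ∧ b ∈ T') := by
  simp only [memT, List.mem_map, Prod.mk.injEq]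
  constructor
  · rintro (⟨⟨u,v⟩,hp,e1,e2,e3⟩|⟨⟨u,v⟩,hp,e1,e2,e3⟩|⟨⟨u,v⟩,hp,e1,e2,e3⟩|
      ⟨⟨u,v⟩,hp,e1,e2,e3⟩|⟨⟨u,v⟩,hp,e1,e2,e3⟩|⟨⟨u,v⟩,hp,e1,e2,e3⟩) <;>
    obtain ⟨hu, hv⟩ := mem_combos2 hp
    · exact Or.inl ⟨e1.symm, e2 ▸ hu, e3 ▸ hv⟩
    · exact Or.inl ⟨e1.symm, e3 ▸ hv, e2 ▸ hu⟩
    · exact Or.inr (Or.inl ⟨e1.symm, e2 ▸ hu, e3 ▸ hv⟩)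
    · exact Or.inr (Or.inl ⟨e1.symm, e3 ▸ hv, e2 ▸ hu⟩)
    · exact Or.inr (Or.inr ⟨e1.symm, e2 ▸ hu, e3 ▸ hv⟩)
    · exact Or.inr (Or.inr ⟨e1.symm, e3 ▸ hv, e2 ▸ hu⟩)
  · rintro (⟨rfl, hb, hc⟩ | ⟨rfl, ha', hc⟩ | ⟨rfl, ha', hb⟩)
    · rcases combos2_orient hT' hb hc h2 with h | h
      · exact Or.inl ⟨(b, c), h, by simp⟩
      · exact Or.inr (Or.inl ⟨(c, b), h, by simp⟩)
    · rcases combos2_orient hT' ha' hc h3 with h | h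
      · exact Or.inr (Or.inr (Or.inl ⟨(a', c), h, by simp⟩))
      · exact Or.inr (Or.inr (Or.inr (Or.inl ⟨(c, a'), h, by simp⟩)))
    · rcases combos2_orient hT' ha' hb h1 with h | h
      · exact Or.inr (Or.inr (Or.inr (Or.inr (Or.inl ⟨(a', b), h, by simp⟩))))
      · exact Or.inr (Or.inr (Or.inr (Or.inr (Or.inr ⟨(b, a'), h, by simp⟩))))

-- outer loop
theorem loopA_spec (l : List Int) :
    ∀ (m : List Int) (s : List (Int × Int × Int)) (T : List Int),
      (∀ x ∈ m, x ∈ l) → OrdL l T → OrdL m T →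
      (∀ a b c : Int, a ∈ l → b ∈ l → c ∈ l → a ≠ b → b ≠ c → a ≠ c →
        (memT s a b c ↔ ¬(a ∈ T ∧ b ∈ T ∧ c ∈ T))) →
      m.foldl (fun s a => loopB l l a s) s = s ++ combos3 T := by
  intro m
  induction m with
  | nil =>
    intro s T _ _ hOm _
    have hT : T = [] := by simpa [OrdL, myD] using hOm
    subst hT; simp [combos3]
  | cons a m ih =>
    intro s T hsub hOl hOm H
    have hsub' : ∀ x ∈ m, x ∈ l := fun x hx => hsub x (List.mem_cons_of_mem _ hx)
    have hal : a ∈ l := hsub a List.mem_cons_self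
    have hstep : (a :: m).foldl (fun s a => loopB l l a s) s
        = m.foldl (fun s a => loopB l l a s) (loopB l l a s) := by simp
    by_cases haT : a ∈ T
    · obtain ⟨T', hTeq, hOm'⟩ := OrdL_cons_mem hOm haT
      have hOlT' : OrdL l T' := OrdL_suffix (L := l) (d := [a]) (t := T')
        (by rw [hTeq] at hOl; exact hOl)
      have hndT : T.Nodup := OrdL_nodup hOl
      have haT' : a ∉ T' := by
        rw [hTeq] at hndT; exact (List.nodup_cons.1 hndT).1
      have hndT' : T'.Nodup := by
        rw [hTeq] at hndT; exact (List.nodup_cons.1 hndT).2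
      have hmemT : ∀ x : Int, x ∈ T ↔ x = a ∨ x ∈ T' := by
        intro x; rw [hTeq]; exact List.mem_cons
      have hB : loopB l l a s = s ++ (combos2 T').map (fun p => (a, p.1, p.2)) := by
        apply loopB_spec l a l s T' (fun x hx => hx) hOlT' hOlT' haT'
        intro b z hb hz hba hza hbz
        rw [H a b z hal hb hz (fun he => hba he.symm) hbz (fun he => hza he.symm)]
        constructor
        · intro hnot hcon
          exact hnot ⟨haT, (hmemT b).2 (Or.inr hcon.1), (hmemT z).2 (Or.inr hcon.2)⟩
        · intro hnot hcon
          rcases (hmemT b).1 hcon.2.1 with rfl | hb'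
          · exact hba rfl
          · rcases (hmemT z).1 hcon.2.2 with rfl | hz'
            · exact hza rfl
            · exact hnot ⟨hb', hz'⟩
      have H' : ∀ a' b c : Int, a' ∈ l → b ∈ l → c ∈ l → a' ≠ b → b ≠ c → a' ≠ c →
          (memT (s ++ (combos2 T').map (fun p => (a, p.1, p.2))) a' b c ↔
            ¬(a' ∈ T' ∧ b ∈ T' ∧ c ∈ T')) := by
        intro a' b c ha' hb hc h1 h2 h3
        rw [memT_append, H a' b c ha' hb hc h1 h2 h3, memT_mapc2 hndT' h1 h2 h3]
        constructor
        · rintro (hnot | ⟨rfl, hbm, hcm⟩ | ⟨rfl, ham, hcm⟩ | ⟨rfl, ham, hbm⟩)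
          · rintro ⟨k1, k2, k3⟩
            exact hnot ⟨(hmemT a').2 (Or.inr k1), (hmemT b).2 (Or.inr k2),
              (hmemT c).2 (Or.inr k3)⟩
          · rintro ⟨k1, _, _⟩; exact haT' k1
          · rintro ⟨_, k2, _⟩; exact haT' k2
          · rintro ⟨_, _, k3⟩; exact haT' k3
        · intro hnot
          by_cases k1 : a' ∈ T
          · by_cases k2 : b ∈ T
            · by_cases k3 : c ∈ T
              · rcases (hmemT a').1 k1 with rfl | m1
                · rcases (hmemT b).1 k2 with rfl | m2
                  · exact absurd rfl h1
                  · rcases (hmemT c).1 k3 with rfl | m3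
                    · exact absurd rfl h3
                    · exact Or.inr (Or.inl ⟨rfl, m2, m3⟩)
                · rcases (hmemT b).1 k2 with rfl | m2
                  · rcases (hmemT c).1 k3 with rfl | m3
                    · exact absurd rfl h2
                    · exact Or.inr (Or.inr (Or.inl ⟨rfl, m1, m3⟩))
                  · rcases (hmemT c).1 k3 with rfl | m3
                    · exact Or.inr (Or.inr (Or.inr ⟨rfl, m1, m2⟩))
                    · exact absurd ⟨m1, m2, m3⟩ hnot
              · exact Or.inl (fun hcon => k3 hcon.2.2)
            · exact Or.inl (fun hcon => k2 hcon.2.1)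
          · exact Or.inl (fun hcon => k1 hcon.1)
      rw [hstep, hB, ih _ T' hsub' hOlT' hOm' H', hTeq]
      simp [combos3]
    · have hB : loopB l l a s = s := by
        have := loopB_spec l a l s [] (fun x hx => hx) (OrdL_nil l) (OrdL_nil l)
          (List.not_mem_nil) ?_
        · simpa [combos2] using this
        · intro b z hb hz hba hza hbz
          have hm := H a b z hal hb hz (fun he => hba he.symm) hbz (fun he => hza he.symm)
          simp only [List.not_mem_nil, false_and, not_false_iff, iff_true]
          exact hm.2 (fun hcon => haT hcon.1)
      rw [hstep, hB]
      exact ih s T hsub' hOl (OrdL_cons_not_mem hOm haT) H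

theorem getTriples_eq (l : List Int) : getTriples l = combos3 (myD l) := by
  have h := loopA_spec l l PySem.Set.empty (myD l) (fun x hx => hx) ?_ ?_ ?_
  · simpa [getTriples] using h
  · show myD l = (myD l).filter (fun x => decide (x ∈ myD l))
    exact (List.filter_eq_self.2 (fun x hx => by simpa using hx)).symm
  · show myD l = (myD l).filter (fun x => decide (x ∈ myD l))
    exact (List.filter_eq_self.2 (fun x hx => by simpa using hx)).symm
  · intro a b c ha hb hc _ _ _
    constructor
    · intro hm; exact absurd hm (by simp [memT, PySem.Set.empty])
    · intro hnot
      exact absurd ⟨(mem_myD a l).2 ha, (mem_myD b l).2 hb, (mem_myD c l).2 hc⟩ hnot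

-- ===== VERDICT (by name: the statement is the Claim_ definition above) =====
theorem getTriples_spec : Claim_equal_getTriples := by
  unfold Claim_equal_getTriples
  intro l _
  unfold Spec_getTriples getTriples_alt
  rw [getTriples_eq, dedup_eq_myD]
  exact (PySem.Set.ofList_eq_self_of_nodup _ (nodup_combos3 (nodup_myD l))).symm
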